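-- pv_equiv track=rewrite | github.com/jnguyen1192/SPOJ | SPOJ/SPOJ/palin.py | add1tostring
-- ===== SOURCE A (Python) =====
-- def add1tostring(number):
--     s = list(number)
--     retained = 1
--     nb_char = number.__len__()-1
--     zero = 0
--     while retained == 1 and nb_char >= 0:
--         s[nb_char] = str(int(number[nb_char]) + 1)
--         retained = 0
--         if s[nb_char] == '10':
--             s[nb_char] = '0'
--             retained = 1
--             nb_char -= 1
--             zero += 1
--     # Case +1 digit
--     if zero == number.__len__():
--         s = ['1'] + s
--     return "".join(s)
-- ===== SOURCE B (Python) =====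
-- def add1tostring(number):
--     # find the split point: last index whose digit is not '9'
--     i = len(number) - 1
--     while i >= 0 and number[i] == '9':
--         i -= 1
--     if i < 0:
--         # every digit carried (also the empty string)
--         return '1' + '0' * len(number)
--     return number[:i] + str(int(number[i]) + 1) + '0' * (len(number) - 1 - i)
-- ===== Notes on version B (the rewrite author's own statement) =====
-- stated objective: simpler
-- what changed: Replaces A's in-place list mutation with carry/zero flags and a final join by a find-the-last-non-9 scan followed by a direct slice-and-concatenate construction of the result.
import Mathlib
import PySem

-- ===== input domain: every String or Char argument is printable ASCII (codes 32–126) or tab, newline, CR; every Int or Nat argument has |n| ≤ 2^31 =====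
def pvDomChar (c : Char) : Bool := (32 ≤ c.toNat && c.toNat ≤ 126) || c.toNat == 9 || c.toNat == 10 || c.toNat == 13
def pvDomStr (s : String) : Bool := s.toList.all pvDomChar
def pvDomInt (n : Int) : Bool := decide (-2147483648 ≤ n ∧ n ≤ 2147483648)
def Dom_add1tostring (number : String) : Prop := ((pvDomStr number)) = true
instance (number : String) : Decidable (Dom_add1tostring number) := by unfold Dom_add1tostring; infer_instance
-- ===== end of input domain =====

-- B replaces A's in-place list mutation with carry flags by a find-last-non-9 scan
-- plus slice-and-concatenate construction (objective: simpler).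


-- ===== PORT A =====
-- The while loop: state s (Python's list of strings), nb_char, zero; the 'retained = 0'
-- paths return. int(number[nb_char]) raises ValueError on a non-digit char: ofStr? = none
-- there and the port uses .getD 0 as a dummy; exactly those inputs are excluded by Pre_ below.
def add1tostringGo (number : List Char) (s : List String) (nbChar : Int) (zr : Nat) :
    Nat → List String × Nat
  | 0 => (s, zr)
  | fuel + 1 =>
    if 0 ≤ nbChar then
      let d := PySem.Int.toStr ((PySem.Int.ofStr? (String.ofList [number.getD nbChar.toNat ' '])).getD 0 + 1)
      let s' := s.set nbChar.toNat d
      if d = "10" then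
        add1tostringGo number (s'.set nbChar.toNat "0") (nbChar - 1) (zr + 1) fuel
      else (s', zr)
    else (s, zr)

def add1tostring (number : String) : String :=
  let cs := number.toList
  let r := add1tostringGo cs (cs.map (fun c => String.ofList [c])) ((cs.length : Int) - 1) 0 (cs.length + 1)
  let s := if r.2 = cs.length then "1" :: r.1 else r.1
  PySem.Str.join "" s

-- ===== PORT B =====
-- B's while loop: walk i left while number[i] == '9'
def add1tostringAltFind (cs : List Char) (i : Int) : Nat → Int
  | 0 => i
  | fuel + 1 =>
    if 0 ≤ i ∧ cs.getD i.toNat ' ' = '9' then add1tostringAltFind cs (i - 1) fuel else i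

def add1tostring_alt (number : String) : String :=
  let cs := number.toList
  let i := add1tostringAltFind cs ((cs.length : Int) - 1) (cs.length + 1)
  if i < 0 then String.ofList ('1' :: List.replicate cs.length '0')
  else
    String.ofList (cs.take i.toNat
      ++ (PySem.Int.toChars ((PySem.Int.ofStr? (String.ofList [cs.getD i.toNat ' '])).getD 0 + 1))
      ++ List.replicate (cs.length - 1 - i.toNat) '0')

-- ===== PRECONDITION & SPEC =====
-- Pre_ excludes exactly the inputs on which A raises ValueError: the first char left of the
-- trailing run of '9's is not a digit (int() fails there); B raises on the same inputs.
def Pre_add1tostring (number : String) : Prop :=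
  (number.toList.reverse.dropWhile (· == '9')) = [] ∨
    ((number.toList.reverse.dropWhile (· == '9')).headD ' ').isDigit = true
instance (number : String) : Decidable (Pre_add1tostring number) := by
  unfold Pre_add1tostring; infer_instance

def pvWitness_add1tostring : String := "129"

def Spec_add1tostring (number : String) (out : String) : Prop := out = add1tostring_alt number
instance (number : String) (out : String) : Decidable (Spec_add1tostring number out) := by
  unfold Spec_add1tostring; infer_instance

-- ===== CLAIM (what is proved, stated in full; the proofs are below) =====
def Claim_equal_add1tostring : Prop := ∀ (number : String), Dom_add1tostring number → Pre_add1tostring number → Spec_add1tostring number (add1tostring number)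

-- ===== LEMMAS AND PROOFS =====

lemma pvGetD_append_length {α : Type} (xs : List α) (y : α) (ys : List α) (d : α) :
    (xs ++ y :: ys).getD xs.length d = y := by
  induction xs with
  | nil => rfl
  | cons a as ih => simpa using ih

lemma pvSet_append_length {α : Type} (xs : List α) (y : α) (ys : List α) (v : α) :
    (xs ++ y :: ys).set xs.length v = xs ++ v :: ys := by
  induction xs with
  | nil => rfl
  | cons a as ih => simpa using ih

lemma pvJoin_nil_flatten (ll : List (List Char)) :
    PySem.Chars.join [] ll = ll.flatten := by
  induction ll with
  | nil => rfl
  | cons a l ih =>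
    cases l with
    | nil => simp [PySem.Chars.join_singleton]
    | cons b m => simpa [PySem.Chars.join_cons_cons] using ih

lemma pvFlattenSingle (l : List Char) : (l.map (fun c => [c])).flatten = l := by
  induction l with
  | nil => rfl
  | cons a as ih => simpa using ih

lemma pvFlattenRepl (t : Nat) : (List.replicate t (['0'] : List Char)).flatten = List.replicate t '0' := by
  induction t with
  | zero => rfl
  | succ t ih => simpa [List.replicate_succ] using ih

lemma pvNine : PySem.Int.toStr ((PySem.Int.ofStr? (String.ofList ['9'])).getD 0 + 1) = "10" := by decide

set_option maxHeartbeats 1000000 in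
lemma pvDigitCases (c : Char) (hd : c.isDigit = true) (h9 : ¬ c = '9') :
    c = '0' ∨ c = '1' ∨ c = '2' ∨ c = '3' ∨ c = '4' ∨ c = '5' ∨ c = '6' ∨ c = '7' ∨ c = '8' := by
  simp only [Char.isDigit, Bool.and_eq_true, decide_eq_true_eq] at hd
  have hb1 : 48 ≤ c.toNat := UInt32.le_iff_toNat_le.mp hd.1
  have hb2 : c.toNat ≤ 57 := UInt32.le_iff_toNat_le.mp hd.2
  interval_cases h : c.toNat <;>
    (have hc : c = Char.ofNat c.toNat := (Char.ofNat_toNat c).symm) <;>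
    rw [h] at hc <;>
    first
      | (rw [hc]; decide)
      | (exact absurd (hc.trans (by decide)) h9)

lemma pvSuccNe10 (c : Char) (hd : c.isDigit = true) (h9 : ¬ c = '9') :
    ¬ PySem.Int.toStr ((PySem.Int.ofStr? (String.ofList [c])).getD 0 + 1) = "10" := by
  rcases pvDigitCases c hd h9 with h|h|h|h|h|h|h|h|h <;> subst h <;> decide

lemma pvGo_stop (t : Nat) : ∀ (pre : List Char) (c : Char) (done : List Char)
    (post : List String) (z fuel : Nat),
    t + 1 ≤ fuel →
    ¬ PySem.Int.toStr ((PySem.Int.ofStr? (String.ofList [c])).getD 0 + 1) = "10" →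
    add1tostringGo (pre ++ c :: (List.replicate t '9' ++ done))
      ((pre ++ c :: List.replicate t '9').map (fun c => String.ofList [c]) ++ post)
      ((pre.length + t : Nat) : Int) z fuel
    = (pre.map (fun c => String.ofList [c]) ++ PySem.Int.toStr ((PySem.Int.ofStr? (String.ofList [c])).getD 0 + 1) :: (List.replicate t "0" ++ post), z + t) := by
  induction t with
  | zero =>
    intro pre c done post z fuel hf h10
    match fuel, hf with
    | fuel + 1, _ =>
      simp only [add1tostringGo, List.replicate_zero, List.nil_append, List.map_append,
        List.map_cons, List.map_nil, Nat.add_zero]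
      rw [if_pos (Int.natCast_nonneg _), Int.toNat_natCast, pvGetD_append_length,
        List.append_assoc, List.singleton_append,
        show pre.length = (pre.map (fun c => String.ofList [c])).length from (List.length_map _).symm,
        pvSet_append_length, if_neg h10]
  | succ t ih =>
    intro pre c done post z fuel hf h10
    match fuel, hf with
    | fuel + 1, hf =>
      have hnum : pre ++ c :: (List.replicate (t + 1) '9' ++ done)
          = (pre ++ c :: List.replicate t '9') ++ '9' :: done := by
        simp [List.replicate_succ']
      have hmap : (pre ++ c :: List.replicate (t + 1) '9').map (fun c => String.ofList [c])
          = (pre ++ c :: List.replicate t '9').map (fun c => String.ofList [c]) ++ [String.ofList ['9']] := by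
        simp [List.replicate_succ']
      have hidx : ((pre.length + (t + 1) : Nat) : Int).toNat
          = ((pre ++ c :: List.replicate t '9').map (fun c => String.ofList [c])).length := by
        simp; omega
      have hidx2 : ((pre.length + (t + 1) : Nat) : Int).toNat
          = (pre ++ c :: List.replicate t '9').length := by
        simp; omega
      simp only [add1tostringGo]
      rw [if_pos (Int.natCast_nonneg _), hnum, hidx2, pvGetD_append_length]
      rw [if_pos pvNine]
      rw [← hnum, ← hidx2, hidx, hmap, List.append_assoc, List.singleton_append,
        pvSet_append_length, pvSet_append_length]
      have hstep : ((pre.length + (t + 1) : Nat) : Int) - 1 = ((pre.length + t : Nat) : Int) := by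
        push_cast; omega
      rw [hstep]
      have hnum2 : pre ++ c :: (List.replicate (t + 1) '9' ++ done)
          = pre ++ c :: (List.replicate t '9' ++ ('9' :: done)) := by
        simp [List.replicate_succ', List.append_assoc]
      rw [hnum2, ih pre c ('9' :: done) ("0" :: post) (z + 1) fuel (by omega) h10]
      rw [Prod.mk.injEq]
      constructor
      · simp [List.replicate_succ', List.append_assoc]
      · omega

lemma pvGo_all (t : Nat) : ∀ (done : List Char) (post : List String) (z fuel : Nat),
    t + 1 ≤ fuel →
    add1tostringGo (List.replicate t '9' ++ done)
      ((List.replicate t '9').map (fun c => String.ofList [c]) ++ post)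
      ((t : Int) - 1) z fuel
    = (List.replicate t "0" ++ post, z + t) := by
  induction t with
  | zero =>
    intro done post z fuel hf
    match fuel, hf with
    | fuel + 1, _ =>
      simp only [add1tostringGo]
      rw [if_neg (by omega)]
      simp
  | succ t ih =>
    intro done post z fuel hf
    match fuel, hf with
    | fuel + 1, hf =>
      have hnum : List.replicate (t + 1) '9' ++ done
          = List.replicate t '9' ++ ('9' :: done) := by
        simp [List.replicate_succ', List.append_assoc]
      have hmap : (List.replicate (t + 1) '9').map (fun c => String.ofList [c])
          = (List.replicate t '9').map (fun c => String.ofList [c]) ++ [String.ofList ['9']] := by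
        simp [List.replicate_succ']
      have hi : ((t + 1 : Nat) : Int) - 1 = ((t : Nat) : Int) := by push_cast; omega
      have hidx : ((t : Nat) : Int).toNat = (List.replicate t '9').length := by simp
      have hidx2 : ((t : Nat) : Int).toNat
          = ((List.replicate t '9').map (fun c => String.ofList [c])).length := by simp
      simp only [add1tostringGo]
      rw [hi, if_pos (Int.natCast_nonneg _), hnum, hidx, pvGetD_append_length]
      rw [if_pos pvNine]
      rw [hmap, List.append_assoc, List.singleton_append,
        show (List.replicate t '9').length = ((List.replicate t '9').map (fun c => String.ofList [c])).length from by simp,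
        pvSet_append_length, pvSet_append_length]
      rw [ih ('9' :: done) ("0" :: post) (z + 1) fuel (by omega)]
      rw [Prod.mk.injEq]
      constructor
      · simp [List.replicate_succ', List.append_assoc]
      · omega

lemma pvFind_stop (t : Nat) : ∀ (pre : List Char) (c : Char) (done : List Char) (fuel : Nat),
    t + 1 ≤ fuel → ¬ c = '9' →
    add1tostringAltFind (pre ++ c :: (List.replicate t '9' ++ done))
      ((pre.length + t : Nat) : Int) fuel = (pre.length : Int) := by
  induction t with
  | zero =>
    intro pre c done fuel hf h9
    match fuel, hf with
    | fuel + 1, _ =>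
      simp only [add1tostringAltFind, List.replicate_zero, List.nil_append, Nat.add_zero,
        Int.toNat_natCast, pvGetD_append_length]
      rw [if_neg (by simp [h9])]
  | succ t ih =>
    intro pre c done fuel hf h9
    match fuel, hf with
    | fuel + 1, hf =>
      have hnum : pre ++ c :: (List.replicate (t + 1) '9' ++ done)
          = (pre ++ c :: List.replicate t '9') ++ '9' :: done := by
        simp [List.replicate_succ']
      have hidx2 : ((pre.length + (t + 1) : Nat) : Int).toNat
          = (pre ++ c :: List.replicate t '9').length := by
        simp; omega
      have hstep : ((pre.length + (t + 1) : Nat) : Int) - 1 = ((pre.length + t : Nat) : Int) := by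
        push_cast; omega
      simp only [add1tostringAltFind]
      rw [hnum, hidx2, pvGetD_append_length]
      rw [if_pos ⟨Int.natCast_nonneg _, rfl⟩, hstep, ← hnum]
      have hnum2 : pre ++ c :: (List.replicate (t + 1) '9' ++ done)
          = pre ++ c :: (List.replicate t '9' ++ ('9' :: done)) := by
        simp [List.replicate_succ', List.append_assoc]
      rw [hnum2]
      exact ih pre c ('9' :: done) fuel (by omega) h9

lemma pvFind_all (t : Nat) : ∀ (done : List Char) (fuel : Nat),
    t + 1 ≤ fuel →
    add1tostringAltFind (List.replicate t '9' ++ done) ((t : Int) - 1) fuel = -1 := by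
  induction t with
  | zero =>
    intro done fuel hf
    match fuel, hf with
    | fuel + 1, _ =>
      simp only [add1tostringAltFind]
      rw [if_neg (by omega)]
      rfl
  | succ t ih =>
    intro done fuel hf
    match fuel, hf with
    | fuel + 1, hf =>
      have hnum : List.replicate (t + 1) '9' ++ done
          = List.replicate t '9' ++ ('9' :: done) := by
        simp [List.replicate_succ', List.append_assoc]
      have hi : ((t + 1 : Nat) : Int) - 1 = ((t : Nat) : Int) := by push_cast; omega
      have hidx : ((t : Nat) : Int).toNat = (List.replicate t '9').length := by simp
      simp only [add1tostringAltFind]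
      rw [hi, hnum, hidx, pvGetD_append_length]
      rw [if_pos ⟨Int.natCast_nonneg _, rfl⟩]
      exact ih ('9' :: done) fuel (by omega)

lemma pvGo_all' (t z fuel : Nat) (hf : t + 1 ≤ fuel) :
    add1tostringGo (List.replicate t '9')
      ((List.replicate t '9').map (fun c => String.ofList [c])) ((t : Int) - 1) z fuel
    = (List.replicate t "0", z + t) := by
  simpa using pvGo_all t [] [] z fuel hf

lemma pvFind_all' (t fuel : Nat) (hf : t + 1 ≤ fuel) :
    add1tostringAltFind (List.replicate t '9') ((t : Int) - 1) fuel = -1 := by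
  simpa using pvFind_all t [] fuel hf

lemma pvGo_stop' (t : Nat) (pre : List Char) (c : Char) (z fuel : Nat)
    (hf : t + 1 ≤ fuel)
    (h10 : ¬ PySem.Int.toStr ((PySem.Int.ofStr? (String.ofList [c])).getD 0 + 1) = "10") :
    add1tostringGo (pre ++ c :: List.replicate t '9')
      ((pre ++ c :: List.replicate t '9').map (fun c => String.ofList [c]))
      ((pre.length + t : Nat) : Int) z fuel
    = (pre.map (fun c => String.ofList [c]) ++ PySem.Int.toStr ((PySem.Int.ofStr? (String.ofList [c])).getD 0 + 1) :: List.replicate t "0", z + t) := by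
  simpa using pvGo_stop t pre c [] [] z fuel hf h10

lemma pvFind_stop' (t : Nat) (pre : List Char) (c : Char) (fuel : Nat)
    (hf : t + 1 ≤ fuel) (h9 : ¬ c = '9') :
    add1tostringAltFind (pre ++ c :: List.replicate t '9')
      ((pre.length + t : Nat) : Int) fuel = (pre.length : Int) := by
  simpa using pvFind_stop t pre c [] fuel hf h9

lemma pvCase_all (number : String) (t : Nat)
    (hcs : number.toList = List.replicate t '9') :
    add1tostring number = add1tostring_alt number := by
  simp only [add1tostring, add1tostring_alt, hcs, List.length_replicate]
  rw [pvGo_all' t 0 (t + 1) (by omega), pvFind_all' t (t + 1) (by omega)]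
  rw [if_pos (show ((List.replicate t "0", 0 + t) : List String × Nat).2 = t by simp)]
  rw [if_pos (show (-1 : Int) < 0 by norm_num)]
  apply String.ext
  rw [PySem.Str.toList_join]
  simp only [List.map_cons, List.map_replicate]
  rw [show ("" : String).toList = [] from rfl, show ("1" : String).toList = ['1'] from rfl,
    show ("0" : String).toList = ['0'] from rfl]
  rw [pvJoin_nil_flatten, List.flatten_cons, pvFlattenRepl]
  simp

lemma pvCase_stop (number : String) (pre : List Char) (d : Char) (t : Nat)
    (hcs : number.toList = pre ++ d :: List.replicate t '9')
    (hdig : d.isDigit = true) (h9 : ¬ d = '9') :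
    add1tostring number = add1tostring_alt number := by
  have hlen : (pre ++ d :: List.replicate t '9').length = pre.length + 1 + t := by
    simp; omega
  simp only [add1tostring, add1tostring_alt, hcs, hlen]
  have harith : ((pre.length + 1 + t : Nat) : Int) - 1 = ((pre.length + t : Nat) : Int) := by
    push_cast; omega
  rw [harith]
  rw [pvGo_stop' t pre d 0 (pre.length + 1 + t + 1) (by omega) (pvSuccNe10 d hdig h9)]
  rw [pvFind_stop' t pre d (pre.length + 1 + t + 1) (by omega) h9]
  rw [if_neg (show ¬ ((pre.map (fun c => String.ofList [c]) ++ PySem.Int.toStr ((PySem.Int.ofStr? (String.ofList [d])).getD 0 + 1) :: List.replicate t "0", 0 + t) : List String × Nat).2 = pre.length + 1 + t by simp)]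
  rw [if_neg (show ¬ ((pre.length : Int) < 0) by omega)]
  rw [Int.toNat_natCast]
  have htake : (pre ++ d :: List.replicate t '9').take pre.length = pre := by
    simp
  have hget : (pre ++ d :: List.replicate t '9').getD pre.length ' ' = d :=
    pvGetD_append_length pre d (List.replicate t '9') ' '
  have hcount : pre.length + 1 + t - 1 - pre.length = t := by omega
  rw [htake, hget, hcount]
  apply String.ext
  rw [PySem.Str.toList_join]
  simp only [List.map_append, List.map_cons, List.map_map, List.map_replicate]
  rw [show ("" : String).toList = [] from rfl, show ("0" : String).toList = ['0'] from rfl]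
  rw [pvJoin_nil_flatten, List.flatten_append, List.flatten_cons, pvFlattenRepl,
    show List.map (String.toList ∘ fun c => String.ofList [c]) pre = List.map (fun c => [c]) pre from by simp,
    pvFlattenSingle]
  simp [PySem.Int.toList_toStr, List.append_assoc]

-- ===== VERDICT (by name: the statement is the Claim_ definition above) =====
theorem add1tostring_spec : Claim_equal_add1tostring := by
  intro number _ hpre
  unfold Spec_add1tostring
  have hsplit := List.takeWhile_append_dropWhile (p := (· == '9')) (l := number.toList.reverse)
  have htw : number.toList.reverse.takeWhile (· == '9')
      = List.replicate (number.toList.reverse.takeWhile (· == '9')).length '9' :=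
    List.eq_replicate_of_mem (fun b hb => by simpa using List.mem_takeWhile_imp hb)
  cases hdw : number.toList.reverse.dropWhile (· == '9') with
  | nil =>
    apply pvCase_all number (number.toList.reverse.takeWhile (· == '9')).length
    have hrev : number.toList.reverse
        = List.replicate (number.toList.reverse.takeWhile (· == '9')).length '9' := by
      conv_lhs => rw [← hsplit, hdw, List.append_nil]
      exact htw
    have h2 := congrArg List.reverse hrev
    simpa using h2
  | cons d ds =>
    have h9 : ¬ d = '9' := by
      have h := List.head?_dropWhile_not (· == '9') number.toList.reverse
      rw [hdw] at h
      simpa using h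
    have hdig : d.isDigit = true := by
      rcases hpre with h | h
      · rw [hdw] at h; cases h
      · rw [hdw] at h; simpa using h
    apply pvCase_stop number ds.reverse d (number.toList.reverse.takeWhile (· == '9')).length
      ?_ hdig h9
    have hrev : number.toList.reverse
        = List.replicate (number.toList.reverse.takeWhile (· == '9')).length '9' ++ d :: ds := by
      conv_lhs => rw [← hsplit, hdw]
      rw [← htw]
    have h2 := congrArg List.reverse hrev
    simpa [List.append_assoc] using h2
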